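-- pv_equiv track=rewrite | github.com/yz4004/codeforce-python | daily/problem_list/2025/1002.py | Ax
-- ===== SOURCE A (Python) =====
-- MOD = 10 ** 9 + 7
--
-- def Ax(A, x):
--     # A*x = b
--     # m*n * n*1 = m*1
--     m = len(A)
--     b = [0]*m
--     for i, row_a in enumerate(A):
--         cur = 0
--         for aij, xj in zip(row_a, x):
--             cur = (cur + aij * xj) % MOD
--         b[i] = cur
--     return b
-- ===== SOURCE B (Python) =====
-- MOD = 10 ** 9 + 7
--
-- def Ax(A, x):
--     # Column-major: accumulate b as a linear combination of A's columns.
--     # No column exists beyond the widest row, so stop there.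
--     cols = min(len(x), max((len(row) for row in A), default=0))
--     b = [0] * len(A)
--     for j in range(cols):
--         xj = x[j]
--         b = [(bi + row[j] * xj) % MOD if j < len(row) else bi
--              for row, bi in zip(A, b)]
--     return b
-- ===== Notes on version B (the rewrite author's own statement) =====
-- stated objective: alternative
-- what changed: Replaces the row-by-row dot-product loop with a column-major accumulation: the result vector is rebuilt once per column j as b[i] += A[i][j]*x[j] mod MOD, with a per-row guard that reproduces zip's truncation on ragged rows.
import Mathlib
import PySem

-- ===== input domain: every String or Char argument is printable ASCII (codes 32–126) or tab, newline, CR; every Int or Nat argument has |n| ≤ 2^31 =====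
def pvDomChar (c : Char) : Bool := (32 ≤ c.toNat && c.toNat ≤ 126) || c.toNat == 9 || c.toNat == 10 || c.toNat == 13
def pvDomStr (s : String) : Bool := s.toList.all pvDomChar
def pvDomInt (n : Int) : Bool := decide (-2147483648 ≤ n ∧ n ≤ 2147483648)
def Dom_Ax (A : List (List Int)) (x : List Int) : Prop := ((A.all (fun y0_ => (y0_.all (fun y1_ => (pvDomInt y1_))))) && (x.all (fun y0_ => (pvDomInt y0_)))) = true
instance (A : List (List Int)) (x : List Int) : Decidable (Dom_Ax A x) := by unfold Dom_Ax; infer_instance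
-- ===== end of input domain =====

-- B computes the same matrix-vector product mod 10^9+7 column-by-column (a linear
-- combination of columns) instead of A's row-by-row dot products; return value only.

-- ===== PORT A =====
def pvMOD : Int := 10 ^ 9 + 7

-- A: for each row, fold over zip(row, x) accumulating (cur + aij*xj) % MOD
def Ax (A : List (List Int)) (x : List Int) : List Int :=
  A.map (fun row => (row.zip x).foldl (fun cur p => (cur + p.1 * p.2) % pvMOD) 0)

-- ===== PORT B =====
-- B: b starts as [0]*len(A); for each column j, rebuild b adding A[i][j]*x[j] to
-- rows long enough (the guard j < len(row) matches zip's truncation).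
def Ax_alt (A : List (List Int)) (x : List Int) : List Int :=
  let cols := min x.length (A.foldl (fun m row => max m row.length) 0)
  (List.range cols).foldl
    (fun b j =>
      let xj := x.getD j 0
      (A.zip b).map (fun rb =>
        if j < rb.1.length then (rb.2 + rb.1.getD j 0 * xj) % pvMOD else rb.2))
    (List.replicate A.length 0)

-- ===== PRECONDITION & SPEC =====
def Spec_Ax (A : List (List Int)) (x : List Int) (out : List Int) : Prop := out = Ax_alt A x
instance (A : List (List Int)) (x : List Int) (out : List Int) : Decidable (Spec_Ax A x out) := by unfold Spec_Ax; infer_instance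

-- ===== CLAIM (what is proved, stated in full; the proofs are below) =====
def Claim_equal_Ax : Prop := ∀ (A : List (List Int)) (x : List Int), Dom_Ax A x → Spec_Ax A x (Ax A x)

-- ===== LEMMAS AND PROOFS =====

lemma zip_map_self {α β : Type} (l : List α) (g : α → β) :
    l.zip (l.map g) = l.map (fun a => (a, g a)) := by
  induction l with
  | nil => simp
  | cons a t ih => simp [ih]

lemma row_take_succ (row x : List Int) (n : Nat) (hx : n < x.length) :
    (((row.zip x).take (n + 1)).foldl (fun cur p => (cur + p.1 * p.2) % pvMOD) 0)
      = if n < row.length then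
          ((((row.zip x).take n).foldl (fun cur p => (cur + p.1 * p.2) % pvMOD) 0)
            + row.getD n 0 * x.getD n 0) % pvMOD
        else (((row.zip x).take n).foldl (fun cur p => (cur + p.1 * p.2) % pvMOD) 0) := by
  by_cases hr : n < row.length
  · have hlen : n < (row.zip x).length := by simp [List.length_zip]; omega
    rw [List.take_add_one]
    rw [List.getElem?_eq_getElem hlen]
    simp [List.foldl_append, List.getElem_zip, hr, List.getD,
      List.getElem?_eq_getElem hlen, List.getElem?_eq_getElem hx]
  · have hlen : (row.zip x).length ≤ n := by simp [List.length_zip]; omega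
    rw [List.take_of_length_le hlen, List.take_of_length_le (by omega), if_neg hr]

lemma col_invariant (A : List (List Int)) (x : List Int) :
    ∀ n, n ≤ x.length →
      (List.range n).foldl
        (fun b j =>
          let xj := x.getD j 0
          (A.zip b).map (fun rb =>
            if j < rb.1.length then (rb.2 + rb.1.getD j 0 * xj) % pvMOD else rb.2))
        (List.replicate A.length 0)
      = A.map (fun row =>
          ((row.zip x).take n).foldl (fun cur p => (cur + p.1 * p.2) % pvMOD) 0) := by
  intro n hn
  induction n with
  | zero =>
    simp
  | succ n ih =>
    rw [List.range_succ, List.foldl_append, ih (by omega)]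
    simp only [List.foldl_cons, List.foldl_nil]
    rw [zip_map_self, List.map_map]
    refine List.map_congr_left (fun row _ => ?_)
    simp only [Function.comp]
    rw [row_take_succ row x n (by omega)]

lemma foldl_max_mono (A : List (List Int)) : ∀ m : Nat, m ≤ A.foldl (fun m r => max m r.length) m := by
  induction A with
  | nil => intro m; exact le_rfl
  | cons a t ih => intro m; exact le_trans (le_max_left m a.length) (ih _)

lemma foldl_max_le_of_mem (A : List (List Int)) (row : List Int) :
    ∀ m : Nat, row ∈ A → row.length ≤ A.foldl (fun m r => max m r.length) m := by
  induction A with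
  | nil => intro m h; cases h
  | cons a t ih =>
    intro m h
    rcases List.mem_cons.mp h with h | h
    · rw [h]
      exact le_trans (le_max_right m a.length) (foldl_max_mono t _)
    · exact ih _ h

-- ===== VERDICT (by name: the statement is the Claim_ definition above) =====
theorem Ax_spec : Claim_equal_Ax := by
  intro A x _
  show Ax A x = Ax_alt A x
  rw [Ax, Ax_alt]
  rw [col_invariant A x _ (Nat.min_le_left _ _)]
  refine List.map_congr_left (fun row hrow => ?_)
  rw [List.take_of_length_le]
  simp only [List.length_zip]
  exact le_min (Nat.min_le_right _ _)
    (le_trans (Nat.min_le_left _ _) (foldl_max_le_of_mem A row 0 hrow))
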